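-- pv_equiv track=rewrite | github.com/amondal8/VPRTS | Thesis/Files/Definitional data/utilities_dataset.py | stringcreation_columns
-- ===== SOURCE A (Python) =====
-- def stringcreation_columns(my_list):
--   my_str = ""
--   for ind, i in enumerate(my_list):
--     if ind == 0 and len(my_list) != 1:
--       my_str = my_str + "(" + str(i)
--     elif ind ==0 and len(my_list) == 1:
--       my_str = my_str + "(" + str(i) + ")"
--     elif ind == len(my_list) - 1:
--       my_str = my_str + "," + str(i) + ")"
--     else:
--       my_str = my_str + "," + str(i)
--   return my_str
-- ===== SOURCE B (Python) =====
-- def stringcreation_columns(my_list):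
--     if not my_list:
--         return ""
--     return "(" + ",".join(str(i) for i in my_list) + ")"
-- ===== Notes on version B (the rewrite author's own statement) =====
-- stated objective: faster
-- what changed: Replaces the per-index enumerate/branch loop building the string by repeated concatenation with an empty-list guard plus a single ','.join wrapped in parentheses.
import Mathlib
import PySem

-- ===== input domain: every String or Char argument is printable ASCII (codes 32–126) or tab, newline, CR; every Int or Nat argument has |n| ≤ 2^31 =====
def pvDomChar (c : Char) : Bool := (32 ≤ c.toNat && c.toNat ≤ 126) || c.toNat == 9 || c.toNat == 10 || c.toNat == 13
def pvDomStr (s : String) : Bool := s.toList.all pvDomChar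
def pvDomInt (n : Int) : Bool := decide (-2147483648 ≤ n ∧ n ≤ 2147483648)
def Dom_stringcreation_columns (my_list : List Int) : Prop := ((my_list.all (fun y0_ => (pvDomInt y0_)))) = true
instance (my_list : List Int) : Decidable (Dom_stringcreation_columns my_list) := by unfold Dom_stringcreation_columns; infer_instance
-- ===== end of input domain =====

-- B replaces A's per-index enumerate/branch loop (repeated string concatenation) with an empty guard plus ",".join wrapped in "()" (measured faster).


-- ===== PORT A =====
-- the body of A's for-loop over enumerate(my_list): branches in source order
def pvStepA (n : Int) (my_str : String) (p : Int × Int) : String :=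
  if p.1 = 0 ∧ n ≠ 1 then my_str ++ "(" ++ PySem.Int.toStr p.2
  else if p.1 = 0 ∧ n = 1 then my_str ++ "(" ++ PySem.Int.toStr p.2 ++ ")"
  else if p.1 = n - 1 then my_str ++ "," ++ PySem.Int.toStr p.2 ++ ")"
  else my_str ++ "," ++ PySem.Int.toStr p.2

def stringcreation_columns (my_list : List Int) : String :=
  (PySem.List.enumerate my_list).foldl (pvStepA (my_list.length : Int)) ""

-- ===== PORT B =====
def stringcreation_columns_alt (my_list : List Int) : String :=
  match my_list with
  | [] => ""
  | _ => "(" ++ PySem.Str.join "," (my_list.map PySem.Int.toStr) ++ ")"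

-- ===== PRECONDITION & SPEC =====
def Spec_stringcreation_columns (my_list : List Int) (out : String) : Prop := out = stringcreation_columns_alt my_list
instance (my_list : List Int) (out : String) : Decidable (Spec_stringcreation_columns my_list out) := by unfold Spec_stringcreation_columns; infer_instance

-- ===== CLAIM (what is proved, stated in full; the proofs are below) =====
def Claim_equal_stringcreation_columns : Prop := ∀ (my_list : List Int), Dom_stringcreation_columns my_list → Spec_stringcreation_columns my_list (stringcreation_columns my_list)

-- ===== LEMMAS AND PROOFS =====

theorem foldl_append_toList : ∀ (l : List String) (acc : String),
    (l.foldl (fun r s => r ++ s) acc).toList = acc.toList ++ (l.map String.toList).flatten := by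
  intro l
  induction l with
  | nil => intro acc; simp
  | cons s l ih => intro acc; simp [ih]

-- evaluation of A's loop body in each of its four branches
theorem stepA_first (n : Int) (hn : n ≠ 1) (acc : String) (x : Int) :
    pvStepA n acc (0, x) = acc ++ "(" ++ PySem.Int.toStr x := by simp [pvStepA, hn]

theorem stepA_single (acc : String) (x : Int) :
    pvStepA 1 acc (0, x) = acc ++ "(" ++ PySem.Int.toStr x ++ ")" := by simp [pvStepA]

theorem stepA_last (n k : Int) (hk : k ≠ 0) (h : k = n - 1) (acc : String) (x : Int) :
    pvStepA n acc (k, x) = acc ++ "," ++ PySem.Int.toStr x ++ ")" := by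
  subst h; simp [pvStepA, hk]

theorem stepA_mid (n k : Int) (hk : k ≠ 0) (h : k ≠ n - 1) (acc : String) (x : Int) :
    pvStepA n acc (k, x) = acc ++ "," ++ PySem.Int.toStr x := by
  simp [pvStepA, hk, h]

-- the tail of A's loop (indices ≥ 1): each element adds ",x", the last one closes with ")"
theorem foldA_tail (n : Int) : ∀ (t : List Int) (x k : Int) (acc : String),
    1 ≤ k → k + ((x :: t).length : Int) = n →
    (PySem.List.enumerate (x :: t) k).foldl (pvStepA n) acc
      = acc ++ "," ++ PySem.Int.toStr x
          ++ String.join (t.map (fun i => "," ++ PySem.Int.toStr i)) ++ ")" := by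
  intro t
  induction t with
  | nil =>
      intro x k acc hk hn
      rw [PySem.List.enumerate_cons, PySem.List.enumerate_nil, List.foldl_cons, List.foldl_nil,
        stepA_last n k (by omega) (by simp at hn; omega)]
      rw [← String.toList_inj]; simp [String.join]
  | cons y t ih =>
      intro x k acc hk hn
      rw [PySem.List.enumerate_cons, List.foldl_cons,
        stepA_mid n k (by omega) (by simp at hn; omega)]
      rw [ih y (k + 1) _ (by omega) (by simp at hn ⊢; omega)]
      rw [← String.toList_inj]; simp [String.join, foldl_append_toList]

-- ",".join over a nonempty list, peeled at the head
theorem strjoin_cons : ∀ (t : List Int) (a : Int),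
    PySem.Str.join "," ((a :: t).map PySem.Int.toStr)
      = PySem.Int.toStr a ++ String.join (t.map (fun i => "," ++ PySem.Int.toStr i)) := by
  intro t
  induction t with
  | nil =>
      intro a
      rw [← String.toList_inj]; simp [String.join]
  | cons b t ih =>
      intro a
      have hb := ih b
      rw [← String.toList_inj] at hb ⊢
      simp only [List.map_cons, PySem.Str.toList_join] at hb ⊢
      rw [PySem.Chars.join_cons_cons]
      simp [String.join, foldl_append_toList] at hb ⊢
      rw [hb]

-- ===== VERDICT (by name: the statement is the Claim_ definition above) =====
theorem stringcreation_columns_spec : Claim_equal_stringcreation_columns := by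
  intro my_list _
  unfold Spec_stringcreation_columns
  match my_list with
  | [] => rfl
  | [a] =>
      show (PySem.List.enumerate [a] 0).foldl (pvStepA ([a].length : Int)) "" = _
      rw [PySem.List.enumerate_cons, PySem.List.enumerate_nil, List.foldl_cons, List.foldl_nil]
      rw [show (([a].length : Nat) : Int) = 1 by simp, stepA_single]
      show _ = "(" ++ PySem.Str.join "," ([a].map PySem.Int.toStr) ++ ")"
      rw [strjoin_cons]
      rw [← String.toList_inj]; simp [String.join]
  | a :: b :: t =>
      show (PySem.List.enumerate (a :: b :: t) 0).foldl (pvStepA ((a :: b :: t).length : Int)) ""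
        = _
      rw [PySem.List.enumerate_cons, List.foldl_cons,
        stepA_first _ (by simp; omega),
        show (0 : Int) + 1 = 1 by norm_num,
        foldA_tail _ t b 1 _ (by omega) (by simp; omega)]
      show _ = "(" ++ PySem.Str.join "," ((a :: b :: t).map PySem.Int.toStr) ++ ")"
      rw [strjoin_cons]
      rw [← String.toList_inj]; simp
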